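-- pv_equiv track=rewrite | github.com/PauloJuniorVitrine/Omni_Keywords_finder | scripts/validate_compliance.py | _generate_pci_recommendations
-- ===== SOURCE A (Python) =====
-- from typing import Dict, List, Any
--
-- def _generate_pci_recommendations(violations: List[str]) -> List[str]:
--     """Gera recomendações para PCI-DSS"""
--     recommendations = []
--
--     if any("encryption" in violation.lower() for violation in violations):
--         recommendations.append("Implementar criptografia de dados em repouso e em trânsito")
--
--     if any("access" in violation.lower() for violation in violations):
--         recommendations.append("Implementar controle de acesso baseado em roles")
--
--     if any("logging" in violation.lower() for violation in violations):
--         recommendations.append("Implementar logging de auditoria completo")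
--
--     if not recommendations:
--         recommendations.append("Manter conformidade atual e monitorar regularmente")
--
--     return recommendations
-- ===== SOURCE B (Python) =====
-- def _generate_pci_recommendations(violations):
--     """Gera recomendações para PCI-DSS"""
--     # one pass: lowercase each violation once, accumulate which keywords occur
--     has_enc = has_acc = has_log = False
--     for violation in violations:
--         low = violation.lower()
--         has_enc = has_enc or "encryption" in low
--         has_acc = has_acc or "access" in low
--         has_log = has_log or "logging" in low
--     recommendations = []
--     if has_enc:
--         recommendations.append("Implementar criptografia de dados em repouso e em trânsito")
--     if has_acc:
--         recommendations.append("Implementar controle de acesso baseado em roles")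
--     if has_log:
--         recommendations.append("Implementar logging de auditoria completo")
--     return recommendations or ["Manter conformidade atual e monitorar regularmente"]
-- ===== Notes on version B (the rewrite author's own statement) =====
-- stated objective: alternative
-- what changed: Replaces three separate short-circuiting any(...) scans over violations with a single pass that lowercases each element once and maintains three boolean flags, building the result from the flags afterwards.
import Mathlib
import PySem

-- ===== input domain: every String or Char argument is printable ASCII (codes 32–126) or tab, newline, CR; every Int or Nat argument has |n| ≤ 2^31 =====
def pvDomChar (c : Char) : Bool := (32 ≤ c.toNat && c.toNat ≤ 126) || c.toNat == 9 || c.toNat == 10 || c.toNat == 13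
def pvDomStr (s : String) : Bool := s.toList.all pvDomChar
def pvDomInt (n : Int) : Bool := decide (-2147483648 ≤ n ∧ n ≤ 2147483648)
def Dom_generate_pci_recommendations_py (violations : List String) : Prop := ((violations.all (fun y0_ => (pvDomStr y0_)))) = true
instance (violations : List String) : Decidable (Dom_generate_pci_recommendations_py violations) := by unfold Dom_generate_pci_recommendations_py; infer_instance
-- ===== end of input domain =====

-- B: one pass maintaining three keyword flags instead of three separate any(...) scans (alternative decomposition; return value only).

-- ===== PORT A =====
def generate_pci_recommendations_py (violations : List String) : List String :=
  let recommendations : List String := []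
  let recommendations :=
    if violations.any (fun violation => PySem.Str.isIn "encryption" (PySem.Str.lower violation)) then
      recommendations ++ ["Implementar criptografia de dados em repouso e em trânsito"]
    else recommendations
  let recommendations :=
    if violations.any (fun violation => PySem.Str.isIn "access" (PySem.Str.lower violation)) then
      recommendations ++ ["Implementar controle de acesso baseado em roles"]
    else recommendations
  let recommendations :=
    if violations.any (fun violation => PySem.Str.isIn "logging" (PySem.Str.lower violation)) then
      recommendations ++ ["Implementar logging de auditoria completo"]
    else recommendations
  let recommendations :=
    if recommendations = [] then
      recommendations ++ ["Manter conformidade atual e monitorar regularmente"]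
    else recommendations
  recommendations

-- ===== PORT B =====
def generate_pci_recommendations_py_alt (violations : List String) : List String :=
  let flags := violations.foldl
    (fun st violation =>
      let low := PySem.Str.lower violation
      (st.1 || PySem.Str.isIn "encryption" low,
       st.2.1 || PySem.Str.isIn "access" low,
       st.2.2 || PySem.Str.isIn "logging" low))
    (false, false, false)
  let recommendations : List String := []
  let recommendations :=
    if flags.1 then recommendations ++ ["Implementar criptografia de dados em repouso e em trânsito"] else recommendations
  let recommendations :=
    if flags.2.1 then recommendations ++ ["Implementar controle de acesso baseado em roles"] else recommendations
  let recommendations :=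
    if flags.2.2 then recommendations ++ ["Implementar logging de auditoria completo"] else recommendations
  if recommendations = [] then ["Manter conformidade atual e monitorar regularmente"] else recommendations


-- ===== PRECONDITION & SPEC =====
def Spec_generate_pci_recommendations_py (violations : List String) (out : List String) : Prop := out = generate_pci_recommendations_py_alt violations
instance (violations : List String) (out : List String) : Decidable (Spec_generate_pci_recommendations_py violations out) := by unfold Spec_generate_pci_recommendations_py; infer_instance

-- ===== CLAIM (what is proved, stated in full; the proofs are below) =====
def Claim_equal_generate_pci_recommendations_py : Prop := ∀ (violations : List String), Dom_generate_pci_recommendations_py violations → Spec_generate_pci_recommendations_py violations (generate_pci_recommendations_py violations)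

-- ===== LEMMAS AND PROOFS =====

-- the single-pass fold computes exactly the three `any` flags
theorem pv_flags_eq (violations : List String) (e a l : Bool) :
    violations.foldl
      (fun st violation =>
        let low := PySem.Str.lower violation
        (st.1 || PySem.Str.isIn "encryption" low,
         st.2.1 || PySem.Str.isIn "access" low,
         st.2.2 || PySem.Str.isIn "logging" low))
      (e, a, l)
    = (e || violations.any (fun v => PySem.Str.isIn "encryption" (PySem.Str.lower v)),
       a || violations.any (fun v => PySem.Str.isIn "access" (PySem.Str.lower v)),
       l || violations.any (fun v => PySem.Str.isIn "logging" (PySem.Str.lower v))) := by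
  induction violations generalizing e a l with
  | nil => simp
  | cons x xs ih =>
    simp only [List.foldl_cons, List.any_cons]
    rw [ih]
    simp [Bool.or_assoc]

-- ===== VERDICT (by name: the statement is the Claim_ definition above) =====
theorem generate_pci_recommendations_py_spec : Claim_equal_generate_pci_recommendations_py := by
  intro violations _
  unfold Spec_generate_pci_recommendations_py
  unfold generate_pci_recommendations_py generate_pci_recommendations_py_alt
  rw [pv_flags_eq]
  simp only [Bool.false_or]
  cases violations.any (fun v => PySem.Str.isIn "encryption" (PySem.Str.lower v)) <;>
  cases violations.any (fun v => PySem.Str.isIn "access" (PySem.Str.lower v)) <;>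
  cases violations.any (fun v => PySem.Str.isIn "logging" (PySem.Str.lower v)) <;>
    rfl
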